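-- pv_equiv track=rewrite | github.com/louxinye/lxybot_v2 | function/bot_chart.py | getOldResult
-- ===== SOURCE A (Python) =====
-- chart_bid = [1113308, 1116219, 476149]
--
-- now_turns = 1
--
-- def getOldResult(current_chart):
--     result = [0, 0, 0]
--     for i in range(len(chart_bid)):
--         for oldplay in current_chart:
--             if oldplay['turns'] == now_turns and oldplay['bid'] == chart_bid[i]:
--                 result[i] = oldplay['result']
--                 break
--     return result
-- ===== SOURCE B (Python) =====
-- chart_bid = [1113308, 1116219, 476149]
--
-- now_turns = 1
--
-- def getOldResult(current_chart):
--     # one pass: index bid -> result (first matching entry wins), then one lookup per fixed bid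
--     index = {}
--     for oldplay in current_chart:
--         if oldplay['turns'] == now_turns:
--             b = oldplay['bid']
--             if b in chart_bid and b not in index:
--                 index[b] = oldplay['result']
--     return [index.get(b, 0) for b in chart_bid]
-- ===== Notes on version B (the rewrite author's own statement) =====
-- stated objective: alternative
-- what changed: B replaces A's three rescans of current_chart (one per fixed bid, with break) by a single pass that builds a first-occurrence bid->result index and then one dict lookup per bid with default 0.
import Mathlib
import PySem

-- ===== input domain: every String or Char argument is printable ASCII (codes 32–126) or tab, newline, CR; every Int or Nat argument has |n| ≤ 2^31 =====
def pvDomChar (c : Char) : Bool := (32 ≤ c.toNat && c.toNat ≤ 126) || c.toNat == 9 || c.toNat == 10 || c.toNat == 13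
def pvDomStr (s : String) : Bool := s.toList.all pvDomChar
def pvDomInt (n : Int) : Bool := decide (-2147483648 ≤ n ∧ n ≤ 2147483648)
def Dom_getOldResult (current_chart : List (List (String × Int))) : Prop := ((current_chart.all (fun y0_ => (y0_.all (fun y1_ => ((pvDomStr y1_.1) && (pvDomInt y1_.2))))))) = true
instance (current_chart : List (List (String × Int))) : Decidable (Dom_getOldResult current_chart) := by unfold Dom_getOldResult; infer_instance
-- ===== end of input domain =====

-- B builds a first-occurrence bid -> result index in one pass and answers by lookup,
-- instead of A's rescan of current_chart per fixed bid (objective: alternative).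

-- module constants shared by both Pythons
def pvChartBid : List Int := [1113308, 1116219, 476149]
def pvNowTurns : Int := 1

-- ===== PORT A =====
-- inner 'for oldplay in current_chart: if …: …; break' as the obvious structural recursion
-- (dict lookups oldplay['k'] via Dict.get?; '.getD 0' is only reached off Pre_, where A raises KeyError)
def pvScanA (chart : List (List (String × Int))) (b : Int) : Option Int :=
  match chart with
  | [] => none
  | op :: rest =>
    if ((PySem.Dict.mk op).get? "turns").getD 0 == pvNowTurns
        && ((PySem.Dict.mk op).get? "bid").getD 0 == b then
      some (((PySem.Dict.mk op).get? "result").getD 0)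
    else pvScanA rest b

def getOldResult (current_chart : List (List (String × Int))) : List Int :=
  (PySem.List.pyRange 0 (pvChartBid.length : Int) 1).foldl
    (fun result i =>
      match pvScanA current_chart (PySem.List.pyGetD pvChartBid i 0) with
      | some v => PySem.List.pySetD result i v
      | none => result)
    [0, 0, 0]

-- ===== PORT B =====
-- one step of B's index-building loop
def pvStepB (idx : PySem.Dict Int Int) (op : List (String × Int)) : PySem.Dict Int Int :=
  if ((PySem.Dict.mk op).get? "turns").getD 0 == pvNowTurns then
    if pvChartBid.contains (((PySem.Dict.mk op).get? "bid").getD 0)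
        && !(idx.contains (((PySem.Dict.mk op).get? "bid").getD 0)) then
      idx.insert (((PySem.Dict.mk op).get? "bid").getD 0) (((PySem.Dict.mk op).get? "result").getD 0)
    else idx
  else idx

def pvIndexB (current_chart : List (List (String × Int))) : PySem.Dict Int Int :=
  current_chart.foldl pvStepB PySem.Dict.empty

def getOldResult_alt (current_chart : List (List (String × Int))) : List Int :=
  pvChartBid.map (fun b => (pvIndexB current_chart).getD b 0)

-- ===== PRECONDITION & SPEC =====
-- Pre_ excludes inputs on which Python A raises KeyError (an entry lacking 'turns', a
-- turns-matching entry lacking 'bid', or a matching entry lacking 'result'); it also excludes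
-- inputs where such a malformed entry is hidden from A only by its break (A then returns but
-- B's full pass raises KeyError there).
def Pre_getOldResult (current_chart : List (List (String × Int))) : Prop :=
  ∀ op ∈ current_chart,
    ((PySem.Dict.mk op).get? "turns").isSome = true ∧
    (((PySem.Dict.mk op).get? "turns").getD 0 = 1 →
      ((PySem.Dict.mk op).get? "bid").isSome = true ∧
      (((PySem.Dict.mk op).get? "bid").getD 0 ∈ ([1113308, 1116219, 476149] : List Int) →
        ((PySem.Dict.mk op).get? "result").isSome = true))

instance (current_chart : List (List (String × Int))) : Decidable (Pre_getOldResult current_chart) := by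
  unfold Pre_getOldResult; infer_instance

def pvWitness_getOldResult : (List (List (String × Int))) :=
  [[("turns", 1), ("bid", 1113308), ("result", 5)], [("turns", 2), ("x", 0)]]

def Spec_getOldResult (current_chart : List (List (String × Int))) (out : List Int) : Prop := out = getOldResult_alt current_chart
instance (current_chart : List (List (String × Int))) (out : List Int) : Decidable (Spec_getOldResult current_chart out) := by unfold Spec_getOldResult; infer_instance

-- ===== CLAIM (what is proved, stated in full; the proofs are below) =====
def Claim_equal_getOldResult : Prop := ∀ (current_chart : List (List (String × Int))), Dom_getOldResult current_chart → Pre_getOldResult current_chart → Spec_getOldResult current_chart (getOldResult current_chart)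

-- ===== LEMMAS AND PROOFS =====

-- invariant of B's index-building fold: lookup of b in the final index is the accumulator's
-- entry for b, or else the first matching entry of the remaining chart (A's inner scan)
theorem pvIndexB_invariant (b : Int) (hb : pvChartBid.contains b = true) :
    ∀ (chart : List (List (String × Int))) (idx : PySem.Dict Int Int),
      (chart.foldl pvStepB idx).get? b = (idx.get? b).or (pvScanA chart b) := by
  intro chart
  induction chart with
  | nil => intro idx; simp [pvScanA]
  | cons op rest ih =>
    intro idx
    simp only [List.foldl_cons, pvScanA]
    by_cases ht : (((PySem.Dict.mk op).get? "turns").getD 0 == pvNowTurns) = true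
    · by_cases hbid : ((PySem.Dict.mk op).get? "bid").getD 0 = b
      · -- this entry matches b
        rw [if_pos (by simp [ht, hbid])]
        by_cases hc : idx.contains b = true
        · have hstep : pvStepB idx op = idx := by
            unfold pvStepB; rw [if_pos ht, hbid, if_neg (by simp [hc])]
          rw [hstep, ih idx]
          have hsome : (idx.get? b).isSome = true := by
            rwa [← PySem.Dict.contains_eq_isSome_get?]
          obtain ⟨v, hv⟩ := Option.isSome_iff_exists.mp hsome
          simp [hv]
        · have hc' : idx.contains b = false := by
            cases h : idx.contains b
            · rfl
            · exact absurd h hc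
          have hstep : pvStepB idx op
              = idx.insert b (((PySem.Dict.mk op).get? "result").getD 0) := by
            unfold pvStepB; rw [if_pos ht, hbid, if_pos (by simp [hc', show b ∈ pvChartBid by simpa using hb])]
          rw [hstep, ih]
          have hnone : idx.get? b = none := by
            rw [PySem.Dict.get?_eq_none_iff_contains, hc']
          rw [PySem.Dict.get?_insert_self, hnone]
          simp
      · -- turns matches but bid ≠ b
        rw [if_neg (by simp [hbid])]
        by_cases hins : (pvChartBid.contains (((PySem.Dict.mk op).get? "bid").getD 0)
            && !idx.contains (((PySem.Dict.mk op).get? "bid").getD 0)) = true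
        · have hstep : pvStepB idx op = idx.insert (((PySem.Dict.mk op).get? "bid").getD 0)
              (((PySem.Dict.mk op).get? "result").getD 0) := by
            unfold pvStepB; rw [if_pos ht, if_pos hins]
          rw [hstep, ih]
          rw [PySem.Dict.get?_insert_of_ne (hne := fun h => hbid h.symm)]
        · have hstep : pvStepB idx op = idx := by
            unfold pvStepB; rw [if_pos ht, if_neg hins]
          rw [hstep, ih]
    · -- turns does not match
      rw [if_neg (by simp [ht])]
      have hstep : pvStepB idx op = idx := by
        unfold pvStepB; rw [if_neg ht]
      rw [hstep, ih]

theorem pvIndexB_getD (current_chart : List (List (String × Int))) (b : Int)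
    (hb : pvChartBid.contains b = true) :
    (pvIndexB current_chart).getD b 0 = (pvScanA current_chart b).getD 0 := by
  rw [PySem.Dict.getD_eq_get?_getD]
  unfold pvIndexB
  rw [pvIndexB_invariant b hb current_chart PySem.Dict.empty]
  simp [PySem.Dict.get?_empty]

theorem getOldResult_eq (current_chart : List (List (String × Int))) :
    getOldResult current_chart = getOldResult_alt current_chart := by
  have hrange : PySem.List.pyRange 0 ((pvChartBid.length : Int)) 1 = [0, 1, 2] := by decide
  have hA : getOldResult current_chart =
      [(pvScanA current_chart 1113308).getD 0,
       (pvScanA current_chart 1116219).getD 0,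
       (pvScanA current_chart 476149).getD 0] := by
    unfold getOldResult
    rw [hrange]
    simp only [List.foldl_cons, List.foldl_nil]
    have h0 : PySem.List.pyGetD pvChartBid 0 0 = 1113308 := by decide
    have h1 : PySem.List.pyGetD pvChartBid 1 0 = 1116219 := by decide
    have h2 : PySem.List.pyGetD pvChartBid 2 0 = 476149 := by decide
    rw [h0, h1, h2]
    rcases hs0 : pvScanA current_chart 1113308 with _ | v0 <;>
      rcases hs1 : pvScanA current_chart 1116219 with _ | v1 <;>
      rcases hs2 : pvScanA current_chart 476149 with _ | v2 <;>
      simp [PySem.List.pySetD, PySem.List.pySet?, PySem.List.pyIdx?]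
  rw [hA]
  unfold getOldResult_alt pvChartBid
  simp only [List.map_cons, List.map_nil]
  rw [pvIndexB_getD _ _ (by decide), pvIndexB_getD _ _ (by decide), pvIndexB_getD _ _ (by decide)]

-- ===== VERDICT (by name: the statement is the Claim_ definition above) =====
theorem getOldResult_spec : Claim_equal_getOldResult := by
  intro current_chart _ _
  unfold Spec_getOldResult
  exact getOldResult_eq current_chart
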